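-- pv_equiv track=rewrite | github.com/saccofrancesco/workshift | src/services/validation.py | normalize_workdays
-- ===== SOURCE A (Python) =====
-- from collections.abc import Iterable
--
-- class WorkshiftError(ValueError):
--     """User-facing validation error."""
--
-- def normalize_workdays(workdays: Iterable[int]) -> tuple[int, ...]:
--     normalized: tuple[int] = tuple(sorted({int(day) for day in workdays}))
--     if not normalized:
--         raise WorkshiftError("Select at least one workday.")
--     invalid: list[int] = [day for day in normalized if day < 0 or day > 6]
--     if invalid:
--         raise WorkshiftError("Workdays must be between Monday and Sunday.")
--     return normalized
-- ===== SOURCE B (Python) =====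
-- from collections.abc import Iterable
--
-- class WorkshiftError(ValueError):
--     """User-facing validation error."""
--
-- def normalize_workdays(workdays: Iterable[int]) -> tuple[int, ...]:
--     present = [False] * 7
--     invalid: list[int] = []
--     seen = False
--     for day in workdays:
--         d = int(day)
--         seen = True
--         if 0 <= d <= 6:
--             present[d] = True
--         else:
--             invalid.append(d)
--     if not seen:
--         raise WorkshiftError("Select at least one workday.")
--     if invalid:
--         raise WorkshiftError("Workdays must be between Monday and Sunday.")
--     return tuple(i for i in range(7) if present[i])
-- ===== Notes on version B (the rewrite author's own statement) =====
-- stated objective: alternative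
-- what changed: Replaces set-dedup plus comparison sort with a single counting pass into a fixed 7-slot presence array followed by an index scan 0..6.
import Mathlib
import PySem

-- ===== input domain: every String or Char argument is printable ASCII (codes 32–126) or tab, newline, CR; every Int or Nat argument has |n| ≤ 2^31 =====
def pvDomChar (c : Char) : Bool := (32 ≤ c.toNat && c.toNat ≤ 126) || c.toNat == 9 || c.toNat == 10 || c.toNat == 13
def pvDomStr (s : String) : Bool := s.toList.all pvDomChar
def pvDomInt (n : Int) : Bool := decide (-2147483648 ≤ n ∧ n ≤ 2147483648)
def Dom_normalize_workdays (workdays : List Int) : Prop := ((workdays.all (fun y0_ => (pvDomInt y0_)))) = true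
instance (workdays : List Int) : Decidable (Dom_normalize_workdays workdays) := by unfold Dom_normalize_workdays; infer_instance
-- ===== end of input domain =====

-- B replaces A's set-dedup + comparison sort by one counting pass into a 7-slot presence array and an index scan (alternative decomposition, same result).

-- ===== PORT A =====
-- normalized = tuple(sorted({int(day) for day in workdays})); the raising branches are excluded by Pre_
def normalize_workdays (workdays : List Int) : List Int :=
  PySem.List.sorted (PySem.Set.ofList workdays) (fun x => x) false

-- ===== PORT B =====
-- one pass filling present/invalid; raising branches (empty input, invalid nonempty) are excluded by Pre_
def normalize_workdays_alt (workdays : List Int) : List Int :=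
  let st := workdays.foldl
    (fun (s : List Bool × List Int) d =>
      if 0 ≤ d ∧ d ≤ 6 then (s.1.set d.toNat true, s.2) else (s.1, s.2 ++ [d]))
    (List.replicate 7 false, [])
  (PySem.List.pyRange 0 7 1).filter (fun i => st.1.getD i.toNat false)

-- ===== PRECONDITION & SPEC =====
-- A raises WorkshiftError on an empty list and when any day is outside 0..6; exactly those inputs are excluded.
def Pre_normalize_workdays (workdays : List Int) : Prop :=
  workdays ≠ [] ∧ ∀ d ∈ workdays, 0 ≤ d ∧ d ≤ 6
instance (workdays : List Int) : Decidable (Pre_normalize_workdays workdays) := by unfold Pre_normalize_workdays; infer_instance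
def pvWitness_normalize_workdays : List Int := [3, 0, 3, 6]

def Spec_normalize_workdays (workdays : List Int) (out : List Int) : Prop := out = normalize_workdays_alt workdays
instance (workdays : List Int) (out : List Int) : Decidable (Spec_normalize_workdays workdays out) := by unfold Spec_normalize_workdays; infer_instance

-- ===== CLAIM (what is proved, stated in full; the proofs are below) =====
def Claim_equal_normalize_workdays : Prop := ∀ (workdays : List Int), Dom_normalize_workdays workdays → Pre_normalize_workdays workdays → Spec_normalize_workdays workdays (normalize_workdays workdays)

-- ===== LEMMAS AND PROOFS =====

-- the presence array after the fold records exactly membership in workdays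
theorem pv_fold_present (ws : List Int) (h : ∀ d ∈ ws, 0 ≤ d ∧ d ≤ 6)
    (p : List Bool) (inv : List Int) (hp : p.length = 7) (i : Nat) (hi : i < 7) :
    ((ws.foldl
      (fun (s : List Bool × List Int) d =>
        if 0 ≤ d ∧ d ≤ 6 then (s.1.set d.toNat true, s.2) else (s.1, s.2 ++ [d]))
      (p, inv)).1).getD i false = (p.getD i false || decide ((i : Int) ∈ ws)) := by
  induction ws generalizing p inv with
  | nil => simp
  | cons d tl ih =>
    obtain ⟨hd0, hd6⟩ := h d (List.mem_cons_self ..)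
    simp only [List.foldl_cons]
    rw [if_pos (⟨hd0, hd6⟩ : (0:Int) ≤ d ∧ d ≤ 6)]
    rw [ih (fun x hx => h x (List.mem_cons_of_mem _ hx)) _ inv (by simpa using hp)]
    by_cases hid : i = d.toNat
    · subst hid
      have hcast : ((d.toNat : Int)) = d := Int.toNat_of_nonneg hd0
      have hlt : d.toNat < p.length := by omega
      simp [List.getD_eq_getElem?_getD, hlt, hcast]
    · have hne : (i : Int) ≠ d := by omega
      simp [List.getD, List.getElem?_set_ne (by omega : d.toNat ≠ i), hne]

theorem pv_alt_eq_filter_mem (ws : List Int) (h : ∀ d ∈ ws, 0 ≤ d ∧ d ≤ 6) :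
    normalize_workdays_alt ws
      = (PySem.List.pyRange 0 7 1).filter (fun i => decide (i ∈ ws)) := by
  unfold normalize_workdays_alt
  refine List.filter_congr ?_
  intro i hi
  have hi7 : 0 ≤ i ∧ i < 7 := by
    have := (PySem.List.mem_pyRange_one).mp hi
    omega
  have hnat : (i.toNat : Int) = i := Int.toNat_of_nonneg hi7.1
  rw [pv_fold_present ws h _ _ (by simp) i.toNat (by omega)]
  have hbase : (List.replicate 7 false).getD i.toNat false = false := by
    rcases Nat.lt_or_ge i.toNat 7 with hlt | hge
    · rw [List.getD_eq_getElem?_getD, List.getElem?_replicate, if_pos hlt]; rfl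
    · rw [List.getD_eq_getElem?_getD, List.getElem?_replicate, if_neg (by omega)]; rfl
  rw [hbase, hnat]
  simp

-- ===== VERDICT (by name: the statement is the Claim_ definition above) =====
theorem normalize_workdays_spec : Claim_equal_normalize_workdays := by
  intro ws _ hpre
  obtain ⟨-, hall⟩ := hpre
  show normalize_workdays ws = normalize_workdays_alt ws
  rw [pv_alt_eq_filter_mem ws hall]
  unfold normalize_workdays
  apply PySem.List.sorted_eq_of_perm_of_pairwise_lt
  · apply List.perm_of_nodup_nodup_toFinset_eq
    · exact List.Nodup.filter _ (by decide)
    · exact PySem.Set.nodup_ofList ws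
    · ext x
      simp only [List.mem_toFinset, List.mem_filter, PySem.Set.mem_ofList,
        decide_eq_true_eq, PySem.List.mem_pyRange_one]
      constructor
      · rintro ⟨-, hx⟩; exact hx
      · intro hx
        have := hall x hx
        exact ⟨by omega, hx⟩
  · exact List.Pairwise.filter _ (show (PySem.List.pyRange 0 7 1).Pairwise (fun a b => (fun x => x) a < (fun x => x) b) by decide)
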